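-- pv_equiv track=rewrite | github.com/ThomasBooij95/adventofcode | 2021/day3/main.py | get_bytearray
-- ===== SOURCE A (Python) =====
-- def get_bytearray(input):
--     bytelen = len(input.splitlines()[0])
--     full_string = input.replace('\n', '')
--     bytearray = []
--     for i in range(bytelen):
--         bytearray.append([])
--         for j in range(i, len(full_string), bytelen):
--             bytearray[i].append(int(full_string[j]))
--     return bytelen, full_string, bytearray
-- ===== SOURCE B (Python) =====
-- def get_bytearray(input):
--     bytelen = len(input.splitlines()[0])
--     full_string = input.replace('\n', '')
--     cols = {}
--     if bytelen:
--         for k, ch in enumerate(full_string):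
--             cols.setdefault(k % bytelen, []).append(int(ch))
--     return bytelen, full_string, [cols.get(i, []) for i in range(bytelen)]
-- ===== Notes on version B (the rewrite author's own statement) =====
-- stated objective: alternative
-- what changed: Replaced A's nested column-by-column stride loops with a single pass over the flattened string that buckets each character into column k % bytelen via a dict, then reads the columns back in order.
import Mathlib
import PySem

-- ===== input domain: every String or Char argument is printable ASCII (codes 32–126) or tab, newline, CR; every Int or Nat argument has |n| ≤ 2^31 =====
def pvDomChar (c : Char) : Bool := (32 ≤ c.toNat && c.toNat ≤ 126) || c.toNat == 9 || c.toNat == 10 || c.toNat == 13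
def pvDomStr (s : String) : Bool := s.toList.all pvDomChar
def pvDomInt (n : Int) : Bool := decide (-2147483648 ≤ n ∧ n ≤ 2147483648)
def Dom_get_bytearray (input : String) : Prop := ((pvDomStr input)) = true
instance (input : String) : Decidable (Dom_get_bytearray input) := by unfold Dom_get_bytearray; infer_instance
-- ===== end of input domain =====

-- B replaces A's nested column/stride loops by one dict-bucketing pass over the string (k % bytelen),
-- a different decomposition of the same transpose (objective: alternative; no speed claim).

-- shared helpers: both Pythons begin with the same two lines (first-line length, newline-stripped string)
def pvBytelen (input : String) : Int :=
  PySem.Str.len ((PySem.List.pyGet? (PySem.Str.splitlines input) 0).getD "")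
def pvFull (input : String) : String := PySem.Str.replace input "\n" ""
-- int(ch) for a single character; under Pre_ the char is a digit so the defaults never fire
def pvDigit (c : Char) : Int := (PySem.Int.ofChars? [c]).getD 0

-- ===== PORT A =====
def get_bytearray (input : String) : Int × String × List (List Int) :=
  let bytelen := pvBytelen input
  let full_string := pvFull input
  let bytearray : List (List Int) :=
    (PySem.List.pyRange 0 bytelen 1).foldl
      (fun acc i => acc ++ [
        (PySem.List.pyRange i (PySem.Str.len full_string) bytelen).foldl
          (fun row j => row ++ [pvDigit ((PySem.Str.pyGet? full_string j).getD ' ')]) []])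
      []
  (bytelen, full_string, bytearray)

-- ===== PORT B =====
def get_bytearray_alt (input : String) : Int × String × List (List Int) :=
  let bytelen := pvBytelen input
  let full_string := pvFull input
  let cols : PySem.Dict Int (List Int) :=
    if bytelen ≠ 0 then
      (PySem.List.enumerate full_string.toList).foldl
        (fun d p => d.modify (PySem.Int.mod p.1 bytelen) [] (fun l => l ++ [pvDigit p.2]))
        PySem.Dict.empty
    else PySem.Dict.empty
  (bytelen, full_string,
    (PySem.List.pyRange 0 bytelen 1).map (fun i => cols.getD i []))

-- ===== PRECONDITION & SPEC =====
-- Pre_ excludes exactly the inputs where the Python A raises: the empty string (splitlines()[0] is an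
-- IndexError) and inputs whose non-newline characters are not all decimal digits while the first line is
-- nonempty (int(ch) is a ValueError; a carriage return survives the replace and is such a character).
-- A first line that is empty — the input starts with a line break — means bytelen = 0 and A returns
-- without reading any character, so those inputs stay inside Pre_.
def Pre_get_bytearray (input : String) : Prop :=
  input.toList ≠ [] ∧
  (input.toList.head?.getD ' ' = '\n' ∨ input.toList.head?.getD ' ' = '\r' ∨
   input.toList.all (fun c => c == '\n' || PySem.Chars.isdigit c) = true)
instance (input : String) : Decidable (Pre_get_bytearray input) := by
  unfold Pre_get_bytearray; infer_instance
def pvWitness_get_bytearray : String := "010\n101"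
def Spec_get_bytearray (input : String) (out : Int × String × List (List Int)) : Prop :=
  out = get_bytearray_alt input
instance (input : String) (out : Int × String × List (List Int)) :
    Decidable (Spec_get_bytearray input out) := by unfold Spec_get_bytearray; infer_instance

-- ===== CLAIM (what is proved, stated in full; the proofs are below) =====
def Claim_equal_get_bytearray : Prop :=
  ∀ (input : String), Dom_get_bytearray input → Pre_get_bytearray input →
    Spec_get_bytearray input (get_bytearray input)

-- ===== LEMMAS AND PROOFS =====

-- Python's k % b (fmod) for 0 ≤ k, 0 < b, 0 ≤ i < b hits i exactly on the residue class i
lemma pvModIff (x b i : Int) (hx : 0 ≤ x) (hb : 0 < b) (h0 : 0 ≤ i) (hib : i < b) :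
    PySem.Int.mod x b = i ↔ (i ≤ x ∧ b ∣ x - i) := by
  unfold PySem.Int.mod
  have hf : x.fmod b = x % b := by rw [Int.fmod_eq_emod]; simp [le_of_lt hb]
  rw [hf]
  constructor
  · intro h
    have hle : i ≤ x := by
      by_contra hlt
      push Not at hlt
      rw [Int.emod_eq_of_lt hx (lt_trans hlt hib)] at h
      omega
    exact ⟨hle, Int.dvd_self_sub_of_emod_eq h⟩
  · rintro ⟨-, hdvd⟩
    have h1 : x % b = i % b := by
      rw [Int.emod_eq_emod_iff_emod_sub_eq_zero]
      exact Int.emod_eq_zero_of_dvd hdvd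
    rw [h1, Int.emod_eq_of_lt h0 hib]

-- two strictly increasing integer lists with the same members are equal
lemma pvSortedEq (l1 l2 : List Int) (h1 : l1.Pairwise (· < ·)) (h2 : l2.Pairwise (· < ·))
    (hm : ∀ x, x ∈ l1 ↔ x ∈ l2) : l1 = l2 := by
  have p : l1.Perm l2 := by
    apply List.perm_of_nodup_nodup_toFinset_eq
    · exact h1.imp ne_of_lt
    · exact h2.imp ne_of_lt
    · ext x; simp [hm x]
  exact List.Perm.eq_of_pairwise (fun a c _ _ hac hca => by omega) h1 h2 p

-- filtering range(n) by k % b == i IS the stride range(i, n, b)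
lemma pvFilterStride (n : Nat) (b i : Int) (hb : 0 < b) (h0 : 0 ≤ i) (hib : i < b) :
    (PySem.List.pyRange 0 (n : Int) 1).filter (fun j => PySem.Int.mod j b == i)
      = PySem.List.pyRange i (n : Int) b := by
  apply pvSortedEq
  · exact (PySem.List.pairwise_lt_pyRange_one 0 (n : Int)).filter _
  · rw [PySem.List.pyRange_of_pos _ _ hb]
    refine List.Pairwise.map _ (fun a c h => ?_) List.pairwise_lt_range
    have : (a : Int) < (c : Int) := by exact_mod_cast h
    nlinarith
  · intro x
    rw [List.mem_filter, PySem.List.mem_pyRange_one,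
      PySem.List.mem_pyRange_iff_of_pos hb]
    constructor
    · rintro ⟨⟨hx0, hxn⟩, hmod⟩
      have := (pvModIff x b i hx0 hb h0 hib).mp (by simpa using hmod)
      exact ⟨this.1, hxn, this.2⟩
    · rintro ⟨hix, hxn, hdvd⟩
      have hx0 : 0 ≤ x := le_trans h0 hix
      refine ⟨⟨hx0, hxn⟩, ?_⟩
      simpa using (pvModIff x b i hx0 hb h0 hib).mpr ⟨hix, hdvd⟩

-- B's bucket i equals A's stride row i
lemma pvColEq (fs : List Char) (b i : Int) (hb : 0 < b) (h0 : 0 ≤ i) (hib : i < b) :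
    (((PySem.List.enumerate fs).foldl
        (fun d p => d.modify (PySem.Int.mod p.1 b) [] (fun l => l ++ [pvDigit p.2]))
        PySem.Dict.empty).getD i [])
      = (PySem.List.pyRange i (fs.length : Int) b).map
          (fun j => pvDigit (PySem.List.pyGetD fs j ' ')) := by
  have hfold :
      ((PySem.List.enumerate fs).foldl
        (fun d p => d.modify (PySem.Int.mod p.1 b) [] (fun l => l ++ [pvDigit p.2]))
        PySem.Dict.empty)
      = (((PySem.List.enumerate fs).map
            (fun p => (PySem.Int.mod p.1 b, pvDigit p.2))).foldl
          (fun d q => d.modify q.1 [] (fun l => l ++ [q.2])) PySem.Dict.empty) := by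
    rw [List.foldl_map]
  rw [hfold, PySem.Dict.getD_foldl_modify_append,
    PySem.List.enumerate_eq_map_pyRange fs ' ', List.filter_map, List.filter_map,
    List.map_map, List.map_map]
  have hlen : PySem.List.len fs = (fs.length : Int) := rfl
  rw [hlen]
  simp only [Function.comp_def]
  rw [pvFilterStride fs.length b i hb h0 hib]
  simp [PySem.Dict.getD_empty]

-- ===== VERDICT (by name: the statement is the Claim_ definition above) =====
theorem get_bytearray_spec : Claim_equal_get_bytearray := by
  unfold Claim_equal_get_bytearray
  intro input _ _
  unfold Spec_get_bytearray get_bytearray get_bytearray_alt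
  simp only []
  have hb0 : 0 ≤ pvBytelen input := by
    unfold pvBytelen PySem.Str.len; exact Int.natCast_nonneg _
  rcases eq_or_lt_of_le hb0 with hb | hb
  · rw [← hb, PySem.List.pyRange_one_eq_nil (le_refl 0)]
    simp
  · refine Prod.ext rfl (Prod.ext rfl ?_)
    simp only []
    rw [PySem.List.foldl_append_singleton_eq_map, List.nil_append,
      if_pos (by omega : pvBytelen input ≠ 0)]
    apply List.map_congr_left
    intro i hi
    rw [PySem.List.mem_pyRange_one] at hi
    rw [PySem.List.foldl_append_singleton_eq_map, List.nil_append]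
    rw [pvColEq (pvFull input).toList (pvBytelen input) i hb hi.1 hi.2]
    have hlen : PySem.Str.len (pvFull input) = ((pvFull input).toList.length : Int) := rfl
    rw [hlen]
    apply List.map_congr_left
    intro j _
    simp [PySem.List.pyGetD]
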